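-- pv_equiv track=rewrite | github.com/DzOlha/Cluster-Computations-2024 | lab3-optimal-params/stats_3.py | distribute_files_across_processes
-- ===== SOURCE A (Python) =====
-- def distribute_files_across_processes(filenames, processes_count):
--     """
--     Distribute the list of files across multiple MPI processes.
--     """
--     files_per_process = []
--     for i in range(processes_count):
--         files_for_process = []
--         curr_filename_index = i
--         while curr_filename_index < len(filenames):
--             files_for_process.append(filenames[curr_filename_index])
--             curr_filename_index += processes_count
--         files_per_process.append(files_for_process)
--     return files_per_process
-- ===== SOURCE B (Python) =====
-- def distribute_files_across_processes(filenames, processes_count):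
--     """
--     Distribute the list of files across multiple MPI processes.
--     """
--     buckets = [[] for _ in range(processes_count)]
--     if buckets:
--         for i, f in enumerate(filenames):
--             buckets[i % processes_count].append(f)
--     return buckets
-- ===== Notes on version B (the rewrite author's own statement) =====
-- stated objective: idiomatic
-- what changed: One scatter pass over the filenames appending each file to bucket i % processes_count, instead of one strided scan over the whole list per process.
import Mathlib
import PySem

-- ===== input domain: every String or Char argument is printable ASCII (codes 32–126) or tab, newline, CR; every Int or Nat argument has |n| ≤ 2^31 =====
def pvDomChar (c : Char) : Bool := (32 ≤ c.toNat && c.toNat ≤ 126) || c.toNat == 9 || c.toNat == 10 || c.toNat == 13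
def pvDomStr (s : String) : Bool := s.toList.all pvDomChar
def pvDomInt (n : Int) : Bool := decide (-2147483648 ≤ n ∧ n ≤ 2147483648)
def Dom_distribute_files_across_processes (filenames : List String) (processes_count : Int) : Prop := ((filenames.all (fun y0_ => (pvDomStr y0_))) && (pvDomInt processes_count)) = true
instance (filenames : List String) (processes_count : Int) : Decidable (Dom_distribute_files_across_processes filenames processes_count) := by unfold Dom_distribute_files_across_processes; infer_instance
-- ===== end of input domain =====

-- B replaces A's per-process strided scans by one scatter pass over the filenames (same result, idiomatic decomposition).

-- ===== PORT A =====
-- Inner while-loop of A: append filenames[curr], curr += processes_count, while curr < len(filenames).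
-- The '0 ≤ curr ∧ 0 < pc' conjuncts are termination guards only: every call made by the port below has
-- 0 ≤ curr (curr starts as i ∈ range(pc)) and 0 < pc (range(pc) is nonempty); the index is then always in range,
-- so pyGetD is exact for Python's filenames[curr].
def pvAStride (fs : List String) (pc : Int) (curr : Int) : List String :=
  if _h : curr < (fs.length : Int) ∧ 0 ≤ curr ∧ 0 < pc then
    PySem.List.pyGetD fs curr "" :: pvAStride fs pc (curr + pc)
  else []
termination_by ((fs.length : Int) - curr).toNat
decreasing_by omega

def distribute_files_across_processes (filenames : List String) (processes_count : Int) : List (List String) :=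
  (PySem.List.pyRange 0 processes_count 1).foldl
    (fun acc i => acc ++ [pvAStride filenames processes_count i]) []

-- ===== PORT B =====
-- Source B: buckets = [[] for _ in range(pc)]; if buckets: for i, f in enumerate(filenames): buckets[i % pc].append(f)
def distribute_files_across_processes_alt (filenames : List String) (processes_count : Int) : List (List String) :=
  let buckets : List (List String) := (List.range processes_count.toNat).map (fun _ => [])
  if buckets = [] then buckets
  else (PySem.List.enumerate filenames).foldl
    (fun bs p => bs.modify (PySem.Int.mod p.1 processes_count).toNat (fun b => b ++ [p.2])) buckets

-- ===== PRECONDITION & SPEC =====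
def Spec_distribute_files_across_processes (filenames : List String) (processes_count : Int) (out : List (List String)) : Prop := out = distribute_files_across_processes_alt filenames processes_count
instance (filenames : List String) (processes_count : Int) (out : List (List String)) : Decidable (Spec_distribute_files_across_processes filenames processes_count out) := by unfold Spec_distribute_files_across_processes; infer_instance

-- ===== CLAIM (what is proved, stated in full; the proofs are below) =====
def Claim_equal_distribute_files_across_processes : Prop := ∀ (filenames : List String) (processes_count : Int), Dom_distribute_files_across_processes filenames processes_count → Spec_distribute_files_across_processes filenames processes_count (distribute_files_across_processes filenames processes_count)

-- ===== LEMMAS AND PROOFS =====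

theorem pv_foldl_app_map {α β : Type} (g : α → β) (l : List α) (acc : List β) :
    l.foldl (fun acc i => acc ++ [g i]) acc = acc ++ l.map g := by
  induction l generalizing acc with
  | nil => simp
  | cons x xs ih => simp [List.foldl_cons, ih]

theorem pv_stride_nil (pc : Int) (k : Int) : pvAStride [] pc k = [] := by
  rw [pvAStride, dif_neg (by simp; omega)]

-- appending one element to the file list appends it (only) to the stride that reaches index fs.length
theorem pv_stride_append (fs : List String) (x : String) (pc curr : Int)
    (hc : 0 ≤ curr) (hp : 0 < pc) :
    pvAStride (fs ++ [x]) pc curr =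
      pvAStride fs pc curr ++
        (if curr ≤ (fs.length : Int) ∧ ((fs.length : Int) - curr) % pc = 0 then [x] else []) := by
  by_cases h1 : curr < (fs.length : Int)
  · conv_lhs => rw [pvAStride]
    conv_rhs => rw [pvAStride]
    rw [dif_pos (show curr < ((fs ++ [x]).length : Int) ∧ 0 ≤ curr ∧ 0 < pc by
          refine ⟨by simp; omega, hc, hp⟩),
        dif_pos ⟨h1, hc, hp⟩]
    have hhead : PySem.List.pyGetD (fs ++ [x]) curr "" = PySem.List.pyGetD fs curr "" := by
      rw [PySem.List.pyGetD_eq_getElem (fs ++ [x]) "" hc (by simp; omega),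
          PySem.List.pyGetD_eq_getElem fs "" hc (by omega)]
      rw [List.getElem_append_left (by omega)]
    rw [hhead, pv_stride_append fs x pc (curr + pc) (by omega) hp]
    have hcond : (curr + pc ≤ (fs.length : Int) ∧ ((fs.length : Int) - (curr + pc)) % pc = 0) =
        (curr ≤ (fs.length : Int) ∧ ((fs.length : Int) - curr) % pc = 0) := by
      have hmod : ((fs.length : Int) - (curr + pc)) % pc = ((fs.length : Int) - curr) % pc := by
        have harith : (fs.length : Int) - (curr + pc) = ((fs.length : Int) - curr) - pc := by ring
        rw [harith, Int.sub_emod_right]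
      apply propext
      constructor
      · rintro ⟨-, hz⟩
        exact ⟨by omega, by rw [← hmod]; exact hz⟩
      · rintro ⟨-, hz⟩
        have hdvd : pc ∣ ((fs.length : Int) - curr) := Int.dvd_of_emod_eq_zero hz
        have : pc ≤ (fs.length : Int) - curr := Int.le_of_dvd (by omega) hdvd
        exact ⟨by omega, by rw [hmod]; exact hz⟩
    simp only [hcond]
    simp
  · by_cases h2 : curr = (fs.length : Int)
    · subst h2
      conv_lhs => rw [pvAStride]
      conv_rhs => rw [pvAStride]
      rw [dif_pos (show ((fs.length : Int)) < ((fs ++ [x]).length : Int) ∧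
            0 ≤ ((fs.length : Int)) ∧ 0 < pc by refine ⟨by simp, by omega, hp⟩),
          dif_neg (by omega)]
      have hhead : PySem.List.pyGetD (fs ++ [x]) (fs.length : Int) "" = x := by
        rw [PySem.List.pyGetD_eq_getElem (fs ++ [x]) "" (by omega) (by simp)]
        simp
      rw [hhead, pvAStride, dif_neg (by simp; omega)]
      simp
    · conv_lhs => rw [pvAStride]
      conv_rhs => rw [pvAStride]
      rw [dif_neg (by simp; omega), dif_neg (by omega), if_neg (by omega)]
      simp
termination_by ((fs.length : Int) + 1 - curr).toNat
decreasing_by omega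

theorem pv_enumerate_append {α : Type} (fs : List α) (x : α) (s : Int) :
    PySem.List.enumerate (fs ++ [x]) s = PySem.List.enumerate fs s ++ [(s + fs.length, x)] := by
  induction fs generalizing s with
  | nil => simp [PySem.List.enumerate_nil, PySem.List.enumerate_cons]
  | cons y ys ih =>
      simp only [List.cons_append, PySem.List.enumerate_cons, ih, List.length_cons,
        List.cons_append, List.cons.injEq, true_and, List.append_cancel_left_eq,
        Prod.mk.injEq, and_true]
      push_cast
      ring

theorem pv_modify_map_range {β : Type} (g : Nat → β) (f : β → β) (m j : Nat) :
    ((List.range m).map g).modify j f =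
      (List.range m).map (fun k => if k = j then f (g k) else g k) := by
  apply List.ext_getElem?
  intro i
  rw [List.getElem?_modify]
  by_cases hi : i < m
  · by_cases hj : j = i
    · subst hj; simp [hi]
    · simp [hi, hj, Ne.symm hj]
  · have h1 : (List.range m)[i]? = none := List.getElem?_eq_none_iff.mpr (by simp; omega)
    simp [h1]

-- the scatter fold builds exactly the list of strides
theorem pv_scatter_eq (fs : List String) (pc : Int) (hp : 0 < pc) :
    (PySem.List.enumerate fs).foldl
        (fun bs p => bs.modify (PySem.Int.mod p.1 pc).toNat (fun b => b ++ [p.2]))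
        ((List.range pc.toNat).map (fun _ => ([] : List String)))
      = (List.range pc.toNat).map (fun k : Nat => pvAStride fs pc (k : Int)) := by
  induction fs using List.reverseRecOn with
  | nil =>
      rw [PySem.List.enumerate_nil]
      simp only [List.foldl_nil]
      apply List.map_congr_left
      intro k _
      exact (pv_stride_nil pc k).symm
  | append_singleton fs x ih =>
      rw [pv_enumerate_append, List.foldl_append, ih]
      simp only [List.foldl_cons, List.foldl_nil, zero_add]
      rw [PySem.Int.mod_eq_emod_of_pos hp, pv_modify_map_range]
      apply List.map_congr_left
      intro k hk
      rw [List.mem_range] at hk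
      rw [pv_stride_append fs x pc (k : Int) (by omega) hp]
      have hkpc : (k : Int) < pc := by omega
      have hmodlt : (fs.length : Int) % pc < pc := Int.emod_lt_of_pos _ hp
      have hmodnn : (0 : Int) ≤ (fs.length : Int) % pc := Int.emod_nonneg _ (by omega)
      by_cases hkj : k = ((fs.length : Int) % pc).toNat
      · have hkeq : (k : Int) = (fs.length : Int) % pc := by omega
        have hdle : (fs.length : Int) % pc ≤ (fs.length : Int) := by
          have hdiv : 0 ≤ (fs.length : Int) / pc := Int.ediv_nonneg (by omega) (by omega)
          have hdef := Int.emod_def ((fs.length : Int)) pc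
          nlinarith
        rw [if_pos hkj, if_pos ⟨by omega, by
          rw [hkeq, Int.sub_emod, Int.emod_emod_of_dvd _ (dvd_refl pc)]
          simp⟩]
      · have hncond : ¬((k : Int) ≤ (fs.length : Int) ∧
            ((fs.length : Int) - (k : Int)) % pc = 0) := by
          rintro ⟨hle, hz⟩
          have heq : (fs.length : Int) % pc = (k : Int) % pc :=
            Int.emod_eq_emod_iff_emod_sub_eq_zero.mpr hz
          have hksmall : (k : Int) % pc = (k : Int) := Int.emod_eq_of_lt (by omega) hkpc
          apply hkj
          omega
        rw [if_neg hkj, if_neg hncond]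
        simp

-- ===== VERDICT (by name: the statement is the Claim_ definition above) =====
theorem distribute_files_across_processes_spec : Claim_equal_distribute_files_across_processes := by
  intro fs pc _
  unfold Spec_distribute_files_across_processes distribute_files_across_processes
    distribute_files_across_processes_alt
  by_cases hp : 0 < pc
  · have hne : ((List.range pc.toNat).map (fun _ => ([] : List String))) ≠ [] := by
      simp; omega
    simp only []
    rw [if_neg hne, pv_scatter_eq fs pc hp, PySem.List.pyRange_one, pv_foldl_app_map]
    rw [List.map_map]
    simp [Function.comp_def]
  · have h0 : pc.toNat = 0 := by omega
    rw [PySem.List.pyRange_one_eq_nil (by omega)]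
    simp [h0]
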